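-- pv_equiv track=rewrite | github.com/StevenXoFk/Tarea-taller-Tkinter | convertidor.py | base11_a_base9
-- ===== SOURCE A (Python) =====
-- def contarLetras(text):
--     contador = 0
--     for i in text:
--         contador += 1
--     return contador
--
-- def base10_a_base9(numero):
--     decimal = 0
--     exponente = 0
--
--     while numero > 0:
--         digitos = numero % 10
--         decimal += digitos * (10 ** exponente)
--         numero //= 10
--         exponente += 1
--
--     binario = 0
--     valor = 1
--     while decimal > 0:
--         todo = decimal % 9
--         binario += todo * valor
--         decimal //= 9
--         valor *= 10
--
--     return binario
--
-- def base11_a_base9(numero):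
--     res = 0
--     exponente = 0
--     indice = contarLetras(numero) -1
--     while (indice > -1):
--         if (numero[indice] == "A"):
--             digito = 10
--         elif (numero[indice] == "B"):
--             digito = 11
--         elif (numero[indice] == "C"):
--             digito = 12
--         else:
--             digito = int(numero[indice])
--
--         res += digito *(11 **exponente)
--         exponente += 1
--         indice -= 1
--     res = base10_a_base9(res)
--     return res
-- ===== SOURCE B (Python) =====
-- def base11_a_base9(numero):
--     # Horner's single left-to-right pass for the base-11 parse,
--     # then a recursive base-9 re-encoding (digits-as-decimal).
--     n = 0
--     for ch in numero:
--         d = {'A': 10, 'B': 11, 'C': 12}.get(ch)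
--         if d is None:
--             d = int(ch)
--         n = n * 11 + d
--     return _enc(n)
--
-- def _enc(m):
--     if m == 0:
--         return 0
--     return _enc(m // 9) * 10 + m % 9
-- ===== Notes on version B (the rewrite author's own statement) =====
-- stated objective: simpler
-- what changed: Replaces A's right-to-left scan with per-digit 11**e powers and its two-loop decimal round-trip (reconstructing the number digit by digit before re-encoding) by a single left-to-right Horner pass plus one recursive base-9 re-encoding.
import Mathlib
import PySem

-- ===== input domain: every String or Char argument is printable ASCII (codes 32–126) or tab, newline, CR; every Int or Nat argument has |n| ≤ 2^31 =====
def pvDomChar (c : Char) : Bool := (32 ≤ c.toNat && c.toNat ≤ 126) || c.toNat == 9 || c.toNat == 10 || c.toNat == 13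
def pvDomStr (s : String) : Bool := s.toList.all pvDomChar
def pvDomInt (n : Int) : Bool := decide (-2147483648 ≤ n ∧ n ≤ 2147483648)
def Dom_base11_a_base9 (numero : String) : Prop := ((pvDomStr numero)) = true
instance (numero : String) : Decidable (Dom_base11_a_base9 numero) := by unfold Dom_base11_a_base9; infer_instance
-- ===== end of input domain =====

-- B replaces A's right-to-left power accumulation and two-loop decimal round-trip by a single
-- left-to-right Horner pass plus a recursive base-9 re-encoding (objective: simpler).

-- ===== PORT A =====
def contarLetras (text : String) : Int :=
  text.toList.foldl (fun contador _ => contador + 1) 0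

-- first while-loop of base10_a_base9 (exponente kept as the Nat loop counter it is)
def pvLoop1 (numero : Int) (decimal : Int) (exponente : Nat) : Int :=
  if _h : numero > 0 then
    pvLoop1 (PySem.Int.floordiv numero 10)
      (decimal + PySem.Int.mod numero 10 * 10 ^ exponente) (exponente + 1)
  else decimal
termination_by numero.toNat
decreasing_by
  rw [PySem.Int.floordiv_eq_ediv_of_pos (by norm_num : (0:Int) < 10)]; omega

-- second while-loop of base10_a_base9
def pvLoop2 (decimal : Int) (binario : Int) (valor : Int) : Int :=
  if _h : decimal > 0 then
    pvLoop2 (PySem.Int.floordiv decimal 9)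
      (binario + PySem.Int.mod decimal 9 * valor) (valor * 10)
  else binario
termination_by decimal.toNat
decreasing_by
  rw [PySem.Int.floordiv_eq_ediv_of_pos (by norm_num : (0:Int) < 9)]; omega

def base10_a_base9 (numero : Int) : Int :=
  pvLoop2 (pvLoop1 numero 0 0) 0 1

-- the if/elif chain of A's while-loop body; none = ValueError from int(...)
def pvDigitoA (ch : Char) : Option Int :=
  if ch = 'A' then some 10
  else if ch = 'B' then some 11
  else if ch = 'C' then some 12
  else PySem.Int.ofChars? [ch]

-- A's while-loop, right-to-left over the string; none = exception (excluded by Pre_)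
def pvScanA (numero : String) (indice : Int) (res : Int) (exponente : Nat) : Option Int :=
  if _h : indice > -1 then
    match PySem.Str.pyGet? numero indice with
    | none => none
    | some ch =>
      match pvDigitoA ch with
      | none => none
      | some digito =>
        pvScanA numero (indice - 1) (res + digito * 11 ^ exponente) (exponente + 1)
  else some res
termination_by (indice + 1).toNat
decreasing_by omega

def base11_a_base9 (numero : String) : Int :=
  match pvScanA numero (contarLetras numero - 1) 0 0 with
  | some res => base10_a_base9 res
  | none => 0   -- unreachable under Pre_: A raises ValueError there

-- ===== PORT B =====
-- recursive base-9 re-encoding _enc (guard 0 < m makes it total; Python only reaches m ≥ 0)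
def pvEnc (m : Int) : Int :=
  if _h : 0 < m then pvEnc (PySem.Int.floordiv m 9) * 10 + PySem.Int.mod m 9
  else 0
termination_by m.toNat
decreasing_by
  rw [PySem.Int.floordiv_eq_ediv_of_pos (by norm_num : (0:Int) < 9)]; omega

def pvTabla : PySem.Dict Char Int :=
  PySem.Dict.ofList [('A', 10), ('B', 11), ('C', 12)]

-- body of B's for-loop: dict .get with int(ch) fallback; none = ValueError
def pvStepB (n? : Option Int) (ch : Char) : Option Int :=
  match n? with
  | none => none
  | some n =>
    match (match PySem.Dict.get? pvTabla ch with
           | some d => some d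
           | none => PySem.Int.ofChars? [ch]) with
    | none => none
    | some d => some (n * 11 + d)

def base11_a_base9_alt (numero : String) : Int :=
  match numero.toList.foldl pvStepB (some 0) with
  | some n => pvEnc n
  | none => 0   -- unreachable under Pre_: B raises ValueError there

-- ===== PRECONDITION & SPEC =====
-- the valid base-11 digit characters
def pvDigitos : List Char := ['0','1','2','3','4','5','6','7','8','9','A','B','C']
-- Pre_ excludes exactly the strings containing a character that is not a base-11 digit
-- (0-9, A, B, C): on those both A and B raise ValueError in int(...).
def Pre_base11_a_base9 (numero : String) : Prop :=
  (numero.toList.all (fun c => pvDigitos.contains c)) = true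
instance (numero : String) : Decidable (Pre_base11_a_base9 numero) := by
  unfold Pre_base11_a_base9; infer_instance

def pvWitness_base11_a_base9 : String := "C9A0"

def Spec_base11_a_base9 (numero : String) (out : Int) : Prop := out = base11_a_base9_alt numero
instance (numero : String) (out : Int) : Decidable (Spec_base11_a_base9 numero out) := by
  unfold Spec_base11_a_base9; infer_instance

-- ===== CLAIM (what is proved, stated in full; the proofs are below) =====
def Claim_equal_base11_a_base9 : Prop :=
  ∀ (numero : String), Dom_base11_a_base9 numero → Pre_base11_a_base9 numero →
    Spec_base11_a_base9 numero (base11_a_base9 numero)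

-- ===== LEMMAS AND PROOFS =====

-- mathematical digit value of one valid character
def pvDigc (c : Char) : Int :=
  if c = 'A' then 10 else if c = 'B' then 11 else if c = 'C' then 12 else (c.toNat : Int) - 48

-- Horner value of a character list (B's accumulator)
def pvHor (cs : List Char) (n : Int) : Int :=
  cs.foldl (fun n c => n * 11 + pvDigc c) n

lemma pvDigitoA_eval (c : Char) (h : c ∈ pvDigitos) :
    pvDigitoA c = some (pvDigc c) := by
  fin_cases h <;> decide

lemma pvDigB_eval (c : Char) (h : c ∈ pvDigitos) :
    (match PySem.Dict.get? pvTabla c with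
     | some d => some d
     | none => PySem.Int.ofChars? [c]) = some (pvDigc c) := by
  fin_cases h <;> decide

lemma pvStepB_eval (c : Char) (h : c ∈ pvDigitos) (n : Int) :
    pvStepB (some n) c = some (n * 11 + pvDigc c) := by
  unfold pvStepB
  simp only [pvDigB_eval c h]

lemma pvDigc_nonneg (c : Char) (h : c ∈ pvDigitos) : 0 ≤ pvDigc c := by
  fin_cases h <;> decide

lemma pvHor_nonneg (cs : List Char) (h : ∀ c ∈ cs, c ∈ pvDigitos) :
    ∀ n : Int, 0 ≤ n → 0 ≤ pvHor cs n := by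
  induction cs with
  | nil => intro n hn; simpa [pvHor] using hn
  | cons c cs ih =>
      intro n hn
      have hc := pvDigc_nonneg c (h c (by simp))
      have := ih (fun x hx => h x (by simp [hx])) (n * 11 + pvDigc c) (by positivity)
      simpa [pvHor] using this

lemma pvHor_append_singleton (cs : List Char) (c : Char) (n : Int) :
    pvHor (cs ++ [c]) n = pvHor cs n * 11 + pvDigc c := by
  simp [pvHor]

lemma contarLetras_eq (numero : String) :
    contarLetras numero = (numero.toList.length : Int) := by
  unfold contarLetras
  generalize numero.toList = l
  have : ∀ (a : Int) (l : List Char),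
      l.foldl (fun contador _ => contador + 1) a = a + l.length := by
    intro a l
    induction l generalizing a with
    | nil => simp
    | cons y ys ihy => simp [List.foldl_cons, ihy]; omega
  simp [this]

lemma pvLoop1_id : ∀ (k : Nat) (n : Int), n.toNat = k → 0 ≤ n →
    ∀ (d : Int) (e : Nat), pvLoop1 n d e = d + n * 10 ^ e := by
  intro k
  induction k using Nat.strong_induction_on with
  | _ k ih =>
    intro n hk hn d e
    rw [pvLoop1]
    split
    · rename_i h
      rw [PySem.Int.floordiv_eq_ediv_of_pos (by norm_num : (0:Int) < 10),
          PySem.Int.mod_eq_emod_of_pos (by norm_num : (0:Int) < 10)]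
      rw [ih (n / 10).toNat (by omega) _ rfl (by omega)]
      have hdm : 10 * (n / 10) + n % 10 = n := Int.mul_ediv_add_emod n 10
      rw [pow_succ]
      linear_combination ((10:Int) ^ e) * hdm
    · rename_i h
      have : n = 0 := by omega
      simp [this]

lemma pvLoop2_enc : ∀ (k : Nat) (n : Int), n.toNat = k → 0 ≤ n →
    ∀ (b v : Int), pvLoop2 n b v = b + pvEnc n * v := by
  intro k
  induction k using Nat.strong_induction_on with
  | _ k ih =>
    intro n hk hn b v
    rw [pvLoop2, pvEnc]
    split
    · rename_i h
      rw [PySem.Int.floordiv_eq_ediv_of_pos (by norm_num : (0:Int) < 9),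
          PySem.Int.mod_eq_emod_of_pos (by norm_num : (0:Int) < 9)]
      rw [ih (n / 9).toNat (by omega) _ rfl (by omega)]
      ring
    · rename_i h
      simp

lemma pvScanA_eval (numero : String)
    (hpre : ∀ c ∈ numero.toList, c ∈ pvDigitos) :
    ∀ (i : Nat), i ≤ numero.toList.length → ∀ (res : Int) (e : Nat),
      pvScanA numero ((i : Int) - 1) res e
        = some (res + pvHor (numero.toList.take i) 0 * 11 ^ e) := by
  intro i
  induction i with
  | zero =>
      intro _ res e
      rw [pvScanA]
      simp [pvHor]
  | succ j ih =>
      intro hle res e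
      have hj : j < numero.toList.length := by omega
      rw [pvScanA]
      have hidx : ((j + 1 : Nat) : Int) - 1 = ((j : Nat) : Int) := by push_cast; ring
      rw [dif_pos (by omega)]
      have hget : PySem.Str.pyGet? numero (((j + 1 : Nat) : Int) - 1)
          = some (numero.toList[j]'hj) := by
        rw [hidx, PySem.Str.pyGet?_natCast]
        simp [List.getElem?_eq_getElem hj]
      rw [hget]
      have hmem : numero.toList[j]'hj ∈ numero.toList := List.getElem_mem hj
      simp only [pvDigitoA_eval _ (hpre _ hmem)]
      have harg : ((j + 1 : Nat) : Int) - 1 - 1 = ((j : Nat) : Int) - 1 := by push_cast; ring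
      rw [harg, ih (by omega)]
      congr 1
      have htake : numero.toList.take (j + 1)
          = numero.toList.take j ++ [numero.toList[j]'hj] := by
        rw [List.take_add_one]
        simp [List.getElem?_eq_getElem hj]
      rw [htake, pvHor_append_singleton, pow_succ]
      ring

lemma foldlB_eval (cs : List Char) (h : ∀ c ∈ cs, c ∈ pvDigitos) :
    ∀ n : Int, cs.foldl pvStepB (some n) = some (pvHor cs n) := by
  induction cs with
  | nil => intro n; simp [pvHor]
  | cons c cs ih =>
      intro n
      rw [List.foldl_cons, pvStepB_eval c (h c (by simp))]
      rw [ih (fun x hx => h x (by simp [hx]))]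
      simp [pvHor]

-- ===== VERDICT (by name: the statement is the Claim_ definition above) =====
theorem base11_a_base9_spec : Claim_equal_base11_a_base9 := by
  intro numero _hdom hpre0
  have hpre : ∀ c ∈ numero.toList, c ∈ pvDigitos := by
    simpa [Pre_base11_a_base9, List.all_eq_true] using hpre0
  unfold Spec_base11_a_base9
  have hlen := contarLetras_eq numero
  have hscan := pvScanA_eval numero hpre numero.toList.length (le_refl _) 0 0
  have hnn : 0 ≤ pvHor numero.toList 0 := pvHor_nonneg numero.toList hpre 0 (by norm_num)
  unfold base11_a_base9
  rw [hlen, hscan]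
  simp only [List.take_length, pow_zero, mul_one, zero_add]
  unfold base10_a_base9
  rw [pvLoop1_id _ _ rfl hnn]
  simp only [pow_zero, mul_one, zero_add]
  rw [pvLoop2_enc _ _ rfl hnn]
  unfold base11_a_base9_alt
  rw [foldlB_eval numero.toList hpre 0]
  ring
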